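-- pv_equiv track=rewrite | github.com/TRBogdann/Facultate-An-2 | Python/Tema10Martie/main.py | decrease
-- ===== SOURCE A (Python) =====
-- def decrease(lis):
--     li = lis.copy()
--     k = 0
--     i = len(li)-1
--     while k != 1 and i >= 0:
--         if li[i] == 1:
--             li[i] = 0
--             k = 1
--         else:
--             li[i] = 1
--         i -= 1
--     return li
-- ===== SOURCE B (Python) =====
-- def decrease(lis):
--     n = len(lis)
--     for j in range(n - 1, -1, -1):
--         if lis[j] == 1:
--             return lis[:j] + [0] + [1] * (n - 1 - j)
--     return [1] * n
-- ===== Notes on version B (the rewrite author's own statement) =====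
-- stated objective: alternative
-- what changed: Replaced A's mutating borrow loop (flip each bit from the end until a 1 is zeroed) by finding the rightmost 1 and rebuilding the result by slicing/concatenation; all-zero input yields all ones in both.
import Mathlib
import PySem

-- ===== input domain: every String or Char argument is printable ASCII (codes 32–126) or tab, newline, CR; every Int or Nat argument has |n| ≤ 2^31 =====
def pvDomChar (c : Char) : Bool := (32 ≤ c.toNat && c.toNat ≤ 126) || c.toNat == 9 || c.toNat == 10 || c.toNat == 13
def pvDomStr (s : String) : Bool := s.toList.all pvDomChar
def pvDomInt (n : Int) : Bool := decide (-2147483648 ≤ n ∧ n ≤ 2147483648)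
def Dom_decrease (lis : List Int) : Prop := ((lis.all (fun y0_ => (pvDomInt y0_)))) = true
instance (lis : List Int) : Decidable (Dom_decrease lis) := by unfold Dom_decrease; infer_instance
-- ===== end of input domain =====

-- B rebuilds the decremented bit list from the rightmost 1 by slicing instead of A's flip-while-borrowing loop; same cost, different decomposition.

-- ===== PORT A =====
-- while loop of A: state (li, k, i); i is always in range when read/written
-- (i starts at len-1 and the guard keeps i ≥ 0), so List.set/getD at i.toNat is exact.
def decreaseGo (li : List Int) (k : Int) (i : Int) : List Int :=
  if _h : k ≠ 1 ∧ i ≥ 0 then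
    if li.getD i.toNat 0 = 1 then
      decreaseGo (li.set i.toNat 0) 1 (i - 1)
    else
      decreaseGo (li.set i.toNat 1) k (i - 1)
  else li
termination_by (i + 1).toNat
decreasing_by all_goals omega

def decrease (lis : List Int) : List Int :=
  decreaseGo lis 0 ((lis.length : Int) - 1)

-- ===== PORT B =====
-- for j in range(n-1, -1, -1): find rightmost index with value 1
def findOne (li : List Int) (j : Int) : Option Nat :=
  if _h : j ≥ 0 then
    if li.getD j.toNat 0 = 1 then some j.toNat else findOne li (j - 1)
  else none
termination_by (j + 1).toNat
decreasing_by omega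

def decrease_alt (lis : List Int) : List Int :=
  match findOne lis ((lis.length : Int) - 1) with
  | some j => lis.take j ++ [0] ++ List.replicate (lis.length - 1 - j) 1
  | none => List.replicate lis.length 1

-- ===== PRECONDITION & SPEC =====
def Spec_decrease (lis : List Int) (out : List Int) : Prop := out = decrease_alt lis
instance (lis : List Int) (out : List Int) : Decidable (Spec_decrease lis out) := by unfold Spec_decrease; infer_instance

-- ===== CLAIM (what is proved, stated in full; the proofs are below) =====
def Claim_equal_decrease : Prop := ∀ (lis : List Int), Dom_decrease lis → Spec_decrease lis (decrease lis)

-- ===== LEMMAS AND PROOFS =====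

theorem decreaseGo_one (li : List Int) (i : Int) : decreaseGo li 1 i = li := by
  unfold decreaseGo; simp

theorem decreaseGo_neg (li : List Int) (i : Int) (h : i < 0) : decreaseGo li 0 i = li := by
  unfold decreaseGo; simp [h]

theorem findOne_neg (li : List Int) (j : Int) (h : j < 0) : findOne li j = none := by
  unfold findOne; simp; omega

theorem decreaseGo_zero (li : List Int) (i : Int) (h : i ≥ 0) :
    decreaseGo li 0 i =
      if li.getD i.toNat 0 = 1 then li.set i.toNat 0
      else decreaseGo (li.set i.toNat 1) 0 (i - 1) := by
  rw [decreaseGo]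
  simp [h, decreaseGo_one]

theorem findOne_nonneg (li : List Int) (j : Int) (h : j ≥ 0) :
    findOne li j =
      if li.getD j.toNat 0 = 1 then some j.toNat else findOne li (j - 1) := by
  rw [findOne]; simp [h]

theorem findOne_le (li : List Int) (n : Nat) {j : Nat}
    (h : findOne li (n : Int) = some j) : j ≤ n := by
  induction n with
  | zero =>
    simp only [Nat.cast_zero] at h
    rw [findOne_nonneg li 0 (by omega)] at h
    split at h
    · simp at h; omega
    · rw [findOne_neg li _ (by omega)] at h; simp at h
  | succ m ih =>
    rw [findOne_nonneg li _ (by omega)] at h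
    split at h
    · simp at h
      omega
    · have : ((m + 1 : Nat) : Int) - 1 = (m : Int) := by push_cast; ring
      rw [this] at h
      exact Nat.le_succ_of_le (ih h)

theorem findOne_set_high (li : List Int) (n : Nat) (m : Nat) (v : Int) (hm : n < m) :
    findOne (li.set m v) (n : Int) = findOne li (n : Int) := by
  induction n with
  | zero =>
    simp only [Nat.cast_zero]
    rw [findOne_nonneg _ 0 (by omega), findOne_nonneg li 0 (by omega)]
    have : (li.set m v).getD (0:Int).toNat 0 = li.getD (0:Int).toNat 0 := by
      simp only [List.getD]
      rw [List.getElem?_set_ne (by omega : m ≠ (0:Int).toNat)]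
    rw [this, findOne_neg (li.set m v) (0-1) (by omega), findOne_neg li (0-1) (by omega)]
  | succ k ih =>
    rw [findOne_nonneg _ _ (by omega), findOne_nonneg li _ (by omega)]
    have hget : (li.set m v).getD ((k+1 : Nat):Int).toNat 0 = li.getD ((k+1 : Nat):Int).toNat 0 := by
      simp only [List.getD]
      rw [List.getElem?_set_ne (by omega : m ≠ ((k+1 : Nat):Int).toNat)]
    rw [hget]
    have hc : ((k + 1 : Nat) : Int) - 1 = (k : Int) := by push_cast; ring
    rw [hc, ih (by omega)]

-- characterisation of A's loop started with k = 0 at index n < li.length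
theorem decreaseGo_eq (n : Nat) (li : List Int) (h : n < li.length) :
    decreaseGo li 0 (n : Int) =
      match findOne li (n : Int) with
      | some j => li.take j ++ 0 :: (List.replicate (n - j) 1 ++ li.drop (n + 1))
      | none => List.replicate (n + 1) 1 ++ li.drop (n + 1) := by
  induction n generalizing li with
  | zero =>
    simp only [Nat.cast_zero]
    rw [decreaseGo_zero li 0 (by omega), findOne_nonneg li 0 (by omega)]
    by_cases hb : li.getD (0 : Int).toNat 0 = 1
    · simp only [hb, if_pos]
      simp [List.set_eq_take_append_cons_drop, h]
    · simp only [hb, if_false]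
      rw [decreaseGo_neg _ _ (by omega), findOne_neg _ _ (by omega)]
      simp [List.set_eq_take_append_cons_drop, h]
  | succ m ih =>
    rw [decreaseGo_zero li _ (by omega), findOne_nonneg li _ (by omega)]
    by_cases hb : li.getD ((m+1 : Nat):Int).toNat 0 = 1
    · simp only [hb, if_pos]
      simp [List.set_eq_take_append_cons_drop, h]
    · simp only [hb, if_false]
      have hc : ((m + 1 : Nat) : Int) - 1 = (m : Int) := by push_cast; ring
      have htn : ((m + 1 : Nat) : Int).toNat = m + 1 := by omega
      rw [hc, htn]
      have hlen : m < (li.set (m+1) 1).length := by simp; omega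
      rw [ih (li.set (m+1) 1) hlen]
      rw [findOne_set_high li m (m+1) 1 (by omega)]
      have hdrop : (li.set (m+1) 1).drop (m + 1) = 1 :: li.drop (m + 2) := by
        rw [List.set_eq_take_append_cons_drop, if_pos (by omega : m + 1 < li.length)]
        rw [show m + 2 = m + 1 + 1 by ring]
        exact List.drop_left' (by simp; omega)
      cases hf : findOne li (m : Int) with
      | none =>
        simp only [hdrop]
        rw [List.replicate_succ' (n := m+1) (a := (1:Int))]
        simp
      | some j =>
        have hj : j ≤ m := findOne_le li m hf
        have htake : (li.set (m+1) 1).take j = li.take j := by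
          rw [List.take_set, List.set_eq_of_length_le (by simp; omega)]
        simp only [htake, hdrop]
        rw [show m + 1 - j = (m - j) + 1 by omega, List.replicate_succ' (n := m - j) (a := (1:Int))]
        simp

-- ===== VERDICT (by name: the statement is the Claim_ definition above) =====
theorem decrease_spec : Claim_equal_decrease := by
  intro lis _
  unfold Spec_decrease decrease decrease_alt
  cases lis with
  | nil =>
    rw [show ((([]:List Int).length : Int) - 1) = -1 by simp]
    rw [decreaseGo_neg [] (-1) (by norm_num), findOne_neg [] (-1) (by norm_num)]
    simp
  | cons a t =>
    have hlen : (((a :: t).length - 1 : Nat) : Int) = ((a :: t).length : Int) - 1 := by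
      simp
    rw [← hlen]
    rw [decreaseGo_eq ((a :: t).length - 1) (a :: t) (by simp)]
    have hnn : (a :: t).length - 1 + 1 = (a :: t).length := by simp
    cases hf : findOne (a :: t) (((a :: t).length - 1 : Nat) : Int) with
    | none => simp
    | some j =>
      simp only [hnn, List.drop_length, List.append_nil]
      simp
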